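-- pv_equiv track=rewrite | github.com/riordan34/Python_Course | hw3.py | patternedMessage
-- ===== SOURCE A (Python) =====
-- def patternedMessage(msg, pattern):
--     pattern = pattern.strip()
--     patternedMessage = ''
--     spacelessMsg = ''
--     #get msg without spaces
--     for char in msg:
--         if not char.isspace():
--             spacelessMsg += char
--     i = 0 #pattern Index
--     k = 0 #msg Index
--     while (i < len(pattern)):
--         if pattern[i] ==  ' ':
--             patternedMessage += " "
--         elif pattern[i] == '\n':
--             patternedMessage +='\n'
--         else:
--             patternedMessage += spacelessMsg[k%len(spacelessMsg)] #allow it to loop around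
--             k +=1 #go to next msg index
--         i += 1
--     return patternedMessage
-- ===== SOURCE B (Python) =====
-- def patternedMessage(msg, pattern):
--     pattern = pattern.strip()
--     spaceless = [c for c in msg if not c.isspace()]
--     slots = [i for i, c in enumerate(pattern) if c != ' ' and c != '\n']
--     repl = {i: spaceless[j % len(spaceless)] for j, i in enumerate(slots)}
--     return ''.join(repl.get(i, c) for i, c in enumerate(pattern))
-- ===== Notes on version B (the rewrite author's own statement) =====
-- stated objective: alternative
-- what changed: B precomputes the list of non-whitespace slot positions with enumerate, builds an index-to-character replacement dict mapping the j-th slot position to spaceless[j % len] once, and then assembles the output by dict lookup per pattern position, instead of A's sequential while-loop appending characters with a running message counter.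
import Mathlib
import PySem

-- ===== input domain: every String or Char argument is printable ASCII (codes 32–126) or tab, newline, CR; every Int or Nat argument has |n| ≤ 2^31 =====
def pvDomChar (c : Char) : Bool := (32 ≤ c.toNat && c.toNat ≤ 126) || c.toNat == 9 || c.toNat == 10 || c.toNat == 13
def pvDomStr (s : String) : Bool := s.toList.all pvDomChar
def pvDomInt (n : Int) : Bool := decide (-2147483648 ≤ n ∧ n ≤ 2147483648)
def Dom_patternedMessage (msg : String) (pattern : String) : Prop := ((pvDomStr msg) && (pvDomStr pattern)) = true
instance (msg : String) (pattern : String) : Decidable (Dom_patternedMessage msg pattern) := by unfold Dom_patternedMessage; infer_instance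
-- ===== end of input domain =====

-- B builds an index→char replacement dict from the enumerated slot positions once and then joins
-- the pattern with dict lookups, instead of A's sequential append loop with a running message
-- counter (objective: alternative).


-- ===== PORT A =====
-- A's while-loop over pattern indices; k is the message index; spaceless[k % len] per slot.
-- On empty spaceless Python raises ZeroDivisionError at a slot; there the port's getD is a
-- dummy (' ') — those inputs are excluded by Pre_patternedMessage.
def pmA_loop (spaceless : List Char) : List Char → Nat → List Char
  | [], _ => []
  | c :: rest, k =>
    if c = ' ' then ' ' :: pmA_loop spaceless rest k
    else if c = '\n' then '\n' :: pmA_loop spaceless rest k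
    else (spaceless[k % spaceless.length]?.getD ' ') :: pmA_loop spaceless rest (k + 1)

def patternedMessage (msg : String) (pattern : String) : String :=
  let pat := (PySem.Str.strip pattern).toList
  let spaceless := msg.toList.foldl
    (fun acc c => if !(PySem.Chars.isspace c) then acc ++ [c] else acc) []
  String.mk (pmA_loop spaceless pat 0)

-- ===== PORT B =====
-- Source B: spaceless = filter comprehension; slots = enumerated positions of non-' '/'\n' chars;
-- repl = {i: spaceless[j % len] for j, i in enumerate(slots)} (ZeroDivisionError on empty
-- spaceless with a slot → the port's pyGetD default '!' is a dummy, excluded by Pre_);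
-- result = join of repl.get(i, c) over enumerate(pattern).
def pmB_slot (c : Char) : Bool := !(c == ' ') && !(c == '\n')

def pmB_slots (pat : List Char) (s : Int) : List Int :=
  ((PySem.List.enumerate pat s).filter (fun p => pmB_slot p.2)).map Prod.fst

def patternedMessage_alt (msg : String) (pattern : String) : String :=
  let pat := (PySem.Str.strip pattern).toList
  let spaceless := msg.toList.filter (fun c => !(PySem.Chars.isspace c))
  let slots := pmB_slots pat 0
  let repl : PySem.Dict Int Char := (PySem.List.enumerate slots 0).foldl
    (fun d p => d.insert p.2
      (PySem.List.pyGetD spaceless (PySem.Int.mod p.1 (PySem.List.len spaceless)) '!'))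
    PySem.Dict.empty
  String.mk ((PySem.List.enumerate pat 0).map (fun p => repl.getD p.1 p.2))

-- ===== PRECONDITION & SPEC =====
-- Pre_ excludes only the inputs where Python A raises ZeroDivisionError: the stripped
-- pattern contains a slot character (not ' ' or '\n') while msg has no non-whitespace char.
def Pre_patternedMessage (msg : String) (pattern : String) : Prop :=
  (PySem.Str.strip pattern).toList.any pmB_slot = true →
  msg.toList.any (fun c => !(PySem.Chars.isspace c)) = true
instance (msg : String) (pattern : String) : Decidable (Pre_patternedMessage msg pattern) := by
  unfold Pre_patternedMessage; infer_instance

def pvWitness_patternedMessage : String × String := ("ab", "* *")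

def Spec_patternedMessage (msg : String) (pattern : String) (out : String) : Prop := out = patternedMessage_alt msg pattern
instance (msg : String) (pattern : String) (out : String) : Decidable (Spec_patternedMessage msg pattern out) := by unfold Spec_patternedMessage; infer_instance

-- ===== CLAIM (what is proved, stated in full; the proofs are below) =====
def Claim_equal_patternedMessage : Prop := ∀ (msg : String) (pattern : String), Dom_patternedMessage msg pattern → Pre_patternedMessage msg pattern → Spec_patternedMessage msg pattern (patternedMessage msg pattern)

-- ===== LEMMAS AND PROOFS =====

-- positional value of A's loop: slot positions read spaceless at (k + #earlier slots) % n
theorem pmA_loop_getElem? (L : List Char) : ∀ (pat : List Char) (k m : Nat),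
    (pmA_loop L pat k)[m]? = pat[m]?.map (fun c =>
      if pmB_slot c then L[(k + (pat.take m).countP pmB_slot) % L.length]?.getD ' ' else c) := by
  intro pat
  induction pat with
  | nil => intro k m; rfl
  | cons c rest ih =>
    intro k m
    cases m with
    | zero =>
      by_cases h1 : c = ' '
      · simp [pmA_loop, h1, pmB_slot]
      · by_cases h2 : c = '\n'
        · simp [pmA_loop, h2, pmB_slot]
        · simp [pmA_loop, h1, h2, pmB_slot]
    | succ m =>
      by_cases h1 : c = ' '
      · simpa [pmA_loop, h1, pmB_slot] using ih k m
      · by_cases h2 : c = '\n'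
        · simpa [pmA_loop, h1, h2, pmB_slot] using ih k m
        · have hs : pmB_slot c = true := by simp [pmB_slot, h1, h2]
          have base := ih (k + 1) m
          simp only [pmA_loop, if_neg h1, if_neg h2, List.getElem?_cons_succ, base,
            List.take_succ_cons, List.countP_cons, hs, if_true]
          congr 1
          funext x
          by_cases hx : pmB_slot x = true
          · simp only [hx, if_true]
            congr 3
            omega
          · simp [hx]

theorem pmB_slots_cons (c : Char) (pat : List Char) (s : Int) :
    pmB_slots (c :: pat) s =
      if pmB_slot c then s :: pmB_slots pat (s + 1) else pmB_slots pat (s + 1) := by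
  simp only [pmB_slots, PySem.List.enumerate_cons, List.filter_cons]
  split_ifs <;> simp

theorem mem_pmB_slots {pat : List Char} {s x : Int} :
    x ∈ pmB_slots pat s ↔
      ∃ (k : Nat) (hk : k < pat.length), x = s + k ∧ pmB_slot pat[k] = true := by
  simp only [pmB_slots, List.mem_map, List.mem_filter, PySem.List.mem_enumerate_iff]
  constructor
  · rintro ⟨p, ⟨⟨k, hk, rfl⟩, hs⟩, rfl⟩
    exact ⟨k, hk, rfl, hs⟩
  · rintro ⟨k, hk, rfl, hs⟩
    exact ⟨(s + k, pat[k]), ⟨⟨k, hk, rfl⟩, hs⟩, rfl⟩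

theorem nodup_pmB_slots (pat : List Char) (s : Int) : (pmB_slots pat s).Nodup := by
  have h : ((PySem.List.enumerate pat s).filter (fun p => pmB_slot p.2)).Pairwise
      (fun p q => p.1 < q.1) :=
    (PySem.List.pairwise_lt_enumerate pat s).filter _
  unfold pmB_slots
  exact h.map Prod.fst (fun a b hab => ne_of_lt hab)

-- the m-th pattern position, when a slot, appears in enumerate(slots) with ordinal
-- = number of slots strictly before it
theorem enum_slots_mem (pat : List Char) : ∀ (s t : Int) (m : Nat) (hm : m < pat.length),
    pmB_slot pat[m] = true →
    (t + ((pat.take m).countP pmB_slot : Int), s + (m : Int)) ∈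
      PySem.List.enumerate (pmB_slots pat s) t := by
  induction pat with
  | nil => intro s t m hm; simp at hm
  | cons c rest ih =>
    intro s t m hm hs
    cases m with
    | zero =>
      simp only [List.getElem_cons_zero] at hs
      simp [pmB_slots_cons, hs, PySem.List.enumerate_cons]
    | succ m =>
      simp only [List.getElem_cons_succ] at hs
      have hm' : m < rest.length := by simpa using hm
      by_cases hc : pmB_slot c = true
      · have := ih (s + 1) (t + 1) m hm' hs
        rw [pmB_slots_cons, if_pos hc, PySem.List.enumerate_cons]
        refine List.mem_cons_of_mem _ ?_
        have he1 : t + ((( c :: rest).take (m + 1)).countP pmB_slot : Int) =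
            (t + 1) + ((rest.take m).countP pmB_slot : Int) := by
          simp only [List.take_succ_cons, List.countP_cons, hc]
          push_cast; ring
        have he2 : s + ((m + 1 : Nat) : Int) = (s + 1) + (m : Int) := by push_cast; ring
        rw [he1, he2]
        exact this
      · have hcf : pmB_slot c = false := by simpa using hc
        have := ih (s + 1) t m hm' hs
        rw [pmB_slots_cons, if_neg hc]
        have he1 : t + ((( c :: rest).take (m + 1)).countP pmB_slot : Int) =
            t + ((rest.take m).countP pmB_slot : Int) := by
          simp [hcf]
        have he2 : s + ((m + 1 : Nat) : Int) = (s + 1) + (m : Int) := by push_cast; ring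
        rw [he1, he2]
        exact this

-- ===== VERDICT (by name: the statement is the Claim_ definition above) =====
theorem patternedMessage_spec : Claim_equal_patternedMessage := by
  intro msg pattern _ hpre
  unfold Spec_patternedMessage patternedMessage patternedMessage_alt
  simp only [PySem.List.foldl_append_if_eq_filter, List.nil_append]
  set pat := (PySem.Str.strip pattern).toList with hpat
  set L := msg.toList.filter (fun c => !(PySem.Chars.isspace c)) with hLdef
  set slots := pmB_slots pat 0 with hslots
  set vfun : Int × Int → Char := fun p =>
    PySem.List.pyGetD L (PySem.Int.mod p.1 (PySem.List.len L)) '!' with hvfun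
  set repl : PySem.Dict Int Char := (PySem.List.enumerate slots 0).foldl
    (fun d p => d.insert p.2 (vfun p)) PySem.Dict.empty with hrepl
  -- the dict's items: one fresh key per enumerated slot
  have hitems : repl.items =
      (PySem.List.enumerate slots 0).map (fun p => (p.2, vfun p)) := by
    have h := PySem.Dict.items_foldl_insert_fresh (PySem.List.enumerate slots 0)
      (fun p : Int × Int => p.2) vfun (PySem.Dict.empty : PySem.Dict Int Char)
      (by intro a _; simp [PySem.Dict.contains_empty])
      (by rw [PySem.List.map_snd_enumerate]; exact nodup_pmB_slots pat 0)
    simpa [PySem.Dict.empty] using h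
  have hkeys : repl.keys = slots := by
    simp only [PySem.Dict.keys, hitems, List.map_map]
    have he : ((fun p : Int × Char => p.1) ∘ fun p : Int × Int => (p.2, vfun p)) =
        fun p : Int × Int => p.2 := rfl
    rw [he, PySem.List.map_snd_enumerate]
  have hknd : repl.keys.Nodup := by rw [hkeys]; exact nodup_pmB_slots pat 0
  refine congrArg String.mk (List.ext_getElem? ?_)
  intro m
  rw [pmA_loop_getElem?, List.getElem?_map, PySem.List.getElem?_enumerate, Option.map_map]
  by_cases hm : m < pat.length
  · rw [List.getElem?_eq_getElem hm]
    simp only [Option.map_some, Function.comp_apply, zero_add]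
    by_cases hs : pmB_slot pat[m] = true
    · -- slot position: both read L[(#earlier slots) % L.length]
      have hany : pat.any pmB_slot = true :=
        List.any_eq_true.mpr ⟨pat[m], List.getElem_mem hm, hs⟩
      have hLne : L ≠ [] := by
        rcases List.any_eq_true.mp (hpre hany) with ⟨c, hc, hcs⟩
        intro h
        have hmem : c ∈ L := by rw [hLdef]; exact List.mem_filter.mpr ⟨hc, hcs⟩
        simp [h] at hmem
      have hn : 0 < L.length := List.length_pos_iff.mpr hLne
      set j : Nat := (pat.take m).countP pmB_slot with hj
      have hmemenum : ((j : Int), (m : Int)) ∈ PySem.List.enumerate slots 0 := by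
        have h := enum_slots_mem pat 0 0 m hm hs
        rw [hslots]
        simpa using h
      have hmemitems : ((m : Int), vfun ((j : Int), (m : Int))) ∈ repl.items := by
        rw [hitems]
        exact List.mem_map.mpr ⟨((j : Int), (m : Int)), hmemenum, rfl⟩
      have hgetD := PySem.Dict.getD_of_mem_items repl hmemitems hknd pat[m]
      have hval : vfun ((j : Int), (m : Int)) = L[j % L.length]'(Nat.mod_lt _ hn) := by
        rw [hvfun]
        simp only [PySem.List.len_eq, PySem.Int.mod_natCast, PySem.List.pyGetD_natCast]
        exact List.getD_eq_getElem L '!' (Nat.mod_lt _ hn)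
      have hA : L[j % L.length]?.getD ' ' = L[j % L.length]'(Nat.mod_lt _ hn) := by
        rw [List.getElem?_eq_getElem (Nat.mod_lt _ hn)]
        rfl
      rw [if_pos hs, hgetD, hval, hA]
    · -- non-slot position: both keep the pattern char
      have hsf : pmB_slot pat[m] = false := by simpa using hs
      have hnotmem : ((m : Int)) ∉ repl.keys := by
        rw [hkeys, hslots]
        intro hmem
        rcases mem_pmB_slots.mp hmem with ⟨k, hk, hke, hkslot⟩
        have hkm : k = m := by omega
        subst hkm
        rw [hkslot] at hsf
        exact absurd hsf (by simp)
      have hcont : repl.contains ((m : Int)) = false := by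
        rw [PySem.Dict.contains_eq_decide_mem_keys]
        exact decide_eq_false hnotmem
      rw [if_neg (by simp [hsf]), PySem.Dict.getD_of_not_contains repl pat[m] hcont]
  · rw [List.getElem?_eq_none (l := pat) (i := m) (by omega)]
    simp
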